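-- pv_equiv track=rewrite | github.com/morganoneka/MusicComplexityAnalysis | music_functions.py | clean_chord
-- ===== SOURCE A (Python) =====
-- def clean_chord(chord):
--     # remove bass note notation
--     if "/" in chord:
--         chord = chord.split("/")[0]
--
--     #TODO what if it's capitals????
--     # remove any adds
--     if "add" in chord:
--         chord = chord.split("add")[0]
--
--     # remove any sus
--     if "sus" in chord:
--         chord = chord.split("sus")[0]
--
--     # remove numbers
--     chord = ''.join([i for i in chord if not i.isdigit()])
--
--     return(chord)
-- ===== SOURCE B (Python) =====
-- def clean_chord(chord):
--     # Single left-to-right character walk: stop at the first position where a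
--     # marker ("/", "add", "sus") begins; copy non-digit characters as we go.
--     # Truncation and digit removal are fused into one pass (no splits, no
--     # second filtering pass).
--     out = []
--     n = len(chord)
--     i = 0
--     while i < n:
--         if chord[i] == '/' or chord.startswith('add', i) or chord.startswith('sus', i):
--             break
--         if not chord[i].isdigit():
--             out.append(chord[i])
--         i += 1
--     return ''.join(out)
-- ===== Notes on version B (the rewrite author's own statement) =====
-- stated objective: alternative
-- what changed: A does three staged truncating splits (at '/', 'add', 'sus') and then a separate digit-filter comprehension; B makes one left-to-right character walk that breaks at the first position where any marker starts and copies non-digit characters into an accumulator as it goes, fusing truncation and digit removal into a single pass.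
import Mathlib
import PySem

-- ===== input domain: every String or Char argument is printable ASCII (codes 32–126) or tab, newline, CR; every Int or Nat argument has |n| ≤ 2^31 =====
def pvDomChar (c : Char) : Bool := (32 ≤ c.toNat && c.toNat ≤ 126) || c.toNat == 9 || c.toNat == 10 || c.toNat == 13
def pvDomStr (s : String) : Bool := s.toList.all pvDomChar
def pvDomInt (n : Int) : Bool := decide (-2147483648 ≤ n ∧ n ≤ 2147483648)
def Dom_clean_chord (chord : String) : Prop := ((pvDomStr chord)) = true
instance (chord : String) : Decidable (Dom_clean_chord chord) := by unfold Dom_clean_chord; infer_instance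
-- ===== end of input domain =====

-- B replaces A's three staged truncating splits + separate digit filter by ONE
-- character walk that breaks at the first marker and drops digits as it goes
-- (objective: alternative decomposition, same cost).

-- ===== PORT A =====
-- A: three sequential "if marker in chord: chord = chord.split(marker)[0]" steps, then drop digits.
def clean_chord (chord : String) : String :=
  let cs0 := chord.toList
  let cs1 := if PySem.Chars.isIn ['/'] cs0 then
      (PySem.List.pyGet? (PySem.Chars.splitOn cs0 ['/']) 0).getD [] else cs0
  let cs2 := if PySem.Chars.isIn ['a','d','d'] cs1 then
      (PySem.List.pyGet? (PySem.Chars.splitOn cs1 ['a','d','d']) 0).getD [] else cs1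
  let cs3 := if PySem.Chars.isIn ['s','u','s'] cs2 then
      (PySem.List.pyGet? (PySem.Chars.splitOn cs2 ['s','u','s']) 0).getD [] else cs2
  -- ''.join([i for i in chord if not i.isdigit()])
  String.mk (PySem.Chars.join []
    ((cs3.filter (fun i => !PySem.Chars.isdigit i)).map (fun i => [i])))

-- ===== PORT B =====
-- B's while loop: walk the characters once; break when '/' is the current char
-- or "add"/"sus" starts here (startswith at offset i = isPrefixOf on the tail);
-- otherwise append the char to the accumulator unless it is a digit.
def altGo : List Char → List Char
  | [] => []
  | c :: rest =>
    if c = '/' ∨ ['a','d','d'].isPrefixOf (c :: rest) ∨ ['s','u','s'].isPrefixOf (c :: rest)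
    then []
    else if PySem.Chars.isdigit c then altGo rest else c :: altGo rest

def clean_chord_alt (chord : String) : String :=
  String.mk (altGo chord.toList)

-- ===== PRECONDITION & SPEC =====
def Spec_clean_chord (chord : String) (out : String) : Prop := out = clean_chord_alt chord
instance (chord : String) (out : String) : Decidable (Spec_clean_chord chord out) := by unfold Spec_clean_chord; infer_instance

-- ===== CLAIM (what is proved, stated in full; the proofs are below) =====
def Claim_equal_clean_chord : Prop := ∀ (chord : String), Dom_clean_chord chord → Spec_clean_chord chord (clean_chord chord)

-- ===== LEMMAS AND PROOFS =====

-- cutRec sep l = the longest prefix of l strictly before the first occurrence of sep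
def cutRec (sep : List Char) : List Char → List Char
  | [] => []
  | c :: rest => if sep.isPrefixOf (c :: rest) then [] else c :: cutRec sep rest

-- cutMin l = the longest prefix of l before the first occurrence of ANY of the three markers
def cutMin : List Char → List Char
  | [] => []
  | c :: rest =>
    if ['/'].isPrefixOf (c :: rest) ∨ ['a','d','d'].isPrefixOf (c :: rest) ∨
       ['s','u','s'].isPrefixOf (c :: rest) then []
    else c :: cutMin rest

theorem splitOn_go_acc (sep : List Char) (fuel : Nat) (l cur : List Char)
    (acc : List (List Char)) :
    PySem.Chars.splitOn.go sep fuel l cur acc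
      = acc.reverse ++ PySem.Chars.splitOn.go sep fuel l cur [] := by
  induction fuel generalizing l cur acc with
  | zero => rw [PySem.Chars.splitOn.go.eq_def, PySem.Chars.splitOn.go.eq_def]; simp
  | succ fuel ih =>
    cases l with
    | nil => rw [PySem.Chars.splitOn.go.eq_def, PySem.Chars.splitOn.go.eq_def]; simp
    | cons c rest =>
      rw [PySem.Chars.splitOn.go.eq_def]
      conv_rhs => rw [PySem.Chars.splitOn.go.eq_def]
      by_cases hp : sep.isPrefixOf (c :: rest) = true
      · simp only [hp, if_true]
        rw [ih _ _ (cur.reverse :: acc), ih _ _ ([cur.reverse])]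
        simp
      · simp only [hp, if_false, Bool.false_eq_true]
        exact ih _ _ acc

-- the first piece produced by splitOn.go is the prefix before the first occurrence of sep
theorem splitOn_go_head (sep : List Char) (fuel : Nat) (l cur : List Char)
    (hf : l.length < fuel) :
    ∃ t, PySem.Chars.splitOn.go sep fuel l cur []
      = (cur.reverse ++ cutRec sep l) :: t := by
  induction fuel generalizing l cur with
  | zero => omega
  | succ fuel ih =>
    cases l with
    | nil => rw [PySem.Chars.splitOn.go.eq_def]; exact ⟨[], by simp [cutRec]⟩
    | cons c rest =>
      rw [PySem.Chars.splitOn.go.eq_def]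
      by_cases hp : sep.isPrefixOf (c :: rest) = true
      · simp only [hp, if_true]
        rw [splitOn_go_acc]
        refine ⟨PySem.Chars.splitOn.go sep fuel (List.drop sep.length (c::rest)) [] [], ?_⟩
        simp [cutRec, hp]
      · simp only [hp, if_false, Bool.false_eq_true]
        obtain ⟨t, ht⟩ := ih rest (c :: cur) (by simp at hf ⊢; omega)
        exact ⟨t, by simp [ht, cutRec, hp]⟩

theorem splitOn_head (sep cs : List Char) :
    (PySem.List.pyGet? (PySem.Chars.splitOn cs sep) 0).getD [] = cutRec sep cs := by
  unfold PySem.Chars.splitOn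
  obtain ⟨t, ht⟩ := splitOn_go_head sep (cs.length + 1) cs [] (by omega)
  rw [ht]
  simp [PySem.List.pyGet?, PySem.List.pyIdx?]

theorem cutRec_of_not_isIn (sep cs : List Char) (h : PySem.Chars.isIn sep cs = false) :
    cutRec sep cs = cs := by
  rw [PySem.Chars.isIn_eq_false_iff] at h
  induction cs with
  | nil => rfl
  | cons c rest ih =>
    rw [cutRec]
    have hp : sep.isPrefixOf (c :: rest) = false := by
      by_contra hc
      exact h ((List.isPrefixOf_iff_prefix.mp (by simpa using hc)).isInfix)
    rw [hp]
    simp only [Bool.false_eq_true, if_false]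
    rw [ih (fun hinf => h (hinf.trans (List.suffix_cons c rest).isInfix))]

-- A's "if marker in chord: chord = chord.split(marker)[0]" step IS cutRec
theorem stepA_eq (sep cs : List Char) :
    (if PySem.Chars.isIn sep cs then
        (PySem.List.pyGet? (PySem.Chars.splitOn cs sep) 0).getD [] else cs)
      = cutRec sep cs := by
  by_cases h : PySem.Chars.isIn sep cs = true
  · rw [if_pos h, splitOn_head]
  · rw [if_neg h, cutRec_of_not_isIn sep cs (by simpa using h)]

theorem cutRec_prefix (sep : List Char) (l : List Char) : cutRec sep l <+: l := by
  induction l with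
  | nil => simp [cutRec]
  | cons c rest ih =>
    rw [cutRec]
    split
    · exact List.nil_prefix
    · exact List.cons_prefix_cons.mpr ⟨rfl, ih⟩

theorem not_isPrefixOf_of_sub (sep : List Char) (c : Char) (X Y : List Char)
    (hXY : X <+: Y) (h : ¬ sep.isPrefixOf (c :: Y) = true) :
    ¬ sep.isPrefixOf (c :: X) = true := by
  intro hc
  exact h (List.isPrefixOf_iff_prefix.mpr
    ((List.isPrefixOf_iff_prefix.mp hc).trans (List.cons_prefix_cons.mpr ⟨rfl, hXY⟩)))

-- the three sequential leftmost cuts collapse to one cut at the earliest marker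
theorem cutRec_comp (l : List Char) :
    cutRec ['s','u','s'] (cutRec ['a','d','d'] (cutRec ['/'] l)) = cutMin l := by
  induction l with
  | nil => rfl
  | cons c rest ih =>
    by_cases h1 : ['/'].isPrefixOf (c :: rest) = true
    · simp [cutRec, cutMin, h1]
    · by_cases h2 : ['a','d','d'].isPrefixOf (c :: rest) = true
      · obtain ⟨t, ht⟩ := List.isPrefixOf_iff_prefix.mp h2
        obtain ⟨rfl, rfl⟩ : c = 'a' ∧ rest = 'd' :: 'd' :: t := by
          injection ht with h hh
          exact ⟨h.symm, by simpa using hh.symm⟩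
        simp [cutRec, cutMin, List.isPrefixOf]
      · by_cases h3 : ['s','u','s'].isPrefixOf (c :: rest) = true
        · obtain ⟨t, ht⟩ := List.isPrefixOf_iff_prefix.mp h3
          obtain ⟨rfl, rfl⟩ : c = 's' ∧ rest = 'u' :: 's' :: t := by
            injection ht with h hh
            exact ⟨h.symm, by simpa using hh.symm⟩
          simp [cutRec, cutMin, List.isPrefixOf]
        · have e1 : cutRec ['/'] (c :: rest) = c :: cutRec ['/'] rest := by
            rw [cutRec]; simp [h1]
          have h2' := not_isPrefixOf_of_sub ['a','d','d'] c _ _ (cutRec_prefix ['/'] rest) h2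
          have e2 : cutRec ['a','d','d'] (c :: cutRec ['/'] rest)
              = c :: cutRec ['a','d','d'] (cutRec ['/'] rest) := by
            rw [cutRec]; simp [h2']
          have h3' := not_isPrefixOf_of_sub ['s','u','s'] c _ _
            ((cutRec_prefix ['a','d','d'] (cutRec ['/'] rest)).trans (cutRec_prefix ['/'] rest)) h3
          have e3 : cutRec ['s','u','s'] (c :: cutRec ['a','d','d'] (cutRec ['/'] rest))
              = c :: cutRec ['s','u','s'] (cutRec ['a','d','d'] (cutRec ['/'] rest)) := by
            rw [cutRec]; simp [h3']
          rw [e1, e2, e3, ih, cutMin]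
          simp [h1, h2, h3]

-- B's fused walk = digit-filter of the earliest-marker prefix
theorem altGo_eq_filter_cutMin (l : List Char) :
    altGo l = (cutMin l).filter (fun i => !PySem.Chars.isdigit i) := by
  induction l with
  | nil => rfl
  | cons c rest ih =>
    rw [altGo, cutMin]
    by_cases hm : ['/'].isPrefixOf (c :: rest) = true ∨ ['a','d','d'].isPrefixOf (c :: rest) = true
        ∨ ['s','u','s'].isPrefixOf (c :: rest) = true
    · have hc : c = '/' ∨ ['a','d','d'].isPrefixOf (c :: rest) = true
          ∨ ['s','u','s'].isPrefixOf (c :: rest) = true := by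
        rcases hm with h | h
        · refine Or.inl ?_
          have h' : '/' = c := by simpa [List.isPrefixOf] using h
          exact h'.symm
        · exact Or.inr h
      rw [if_pos hc, if_pos hm]
      rfl
    · have hc : ¬ (c = '/' ∨ ['a','d','d'].isPrefixOf (c :: rest) = true
          ∨ ['s','u','s'].isPrefixOf (c :: rest) = true) := by
        intro h
        apply hm
        rcases h with h | h
        · exact Or.inl (by simp [List.isPrefixOf, h])
        · exact Or.inr h
      rw [if_neg hm, if_neg hc]
      by_cases hd : PySem.Chars.isdigit c = true
      · simp [hd, List.filter, ih]
      · simp [hd, List.filter, ih]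

-- ===== VERDICT (by name: the statement is the Claim_ definition above) =====
theorem clean_chord_spec : Claim_equal_clean_chord := by
  intro chord _
  unfold Spec_clean_chord clean_chord clean_chord_alt
  simp only [stepA_eq, PySem.Chars.join_nil_singletons, cutRec_comp, altGo_eq_filter_cutMin]
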